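-- pv_equiv track=rewrite | github.com/Noxemia/Advent-Of-Code | 2024/day12/solve.py | walkPerimiter
-- ===== SOURCE A (Python) =====
-- def walkPerimiter(perims):
--     pwalked = set()
--     dirChanges = 0
--     dirs = [(0, -1), (1, 0), (0, 1), (-1,0)]
--     sides = 0
--     #dirs = [(1, -1), (1, 1), (-1, 1), (-1,-1)]
--     for _x, _y in perims:
--         if (_x, _y) in pwalked: continue
--         toWalk = [(_x,_y)]
--         while toWalk:
--             x, y = toWalk.pop()
--             for (dx, dy) in dirs:
--                 nx, ny = x+dx, y+dy
--                 if (nx, ny) in perims and (nx, ny) not in pwalked: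
--                     toWalk.append((nx, ny))
--                     pwalked.add((nx, ny))
--         sides += 1
--     return sides
-- ===== SOURCE B (Python) =====
-- def walkPerimiter(perims):
--     # Incremental component merging over the distinct points: each new point
--     # unions itself with every existing component that touches one of its
--     # 4-neighbors; the answer is the number of components left.
--     comps = []
--     for (x, y) in dict.fromkeys(perims):
--         nbrs = {(x, y - 1), (x + 1, y), (x, y + 1), (x - 1, y)}
--         merged = {(x, y)}
--         rest = []
--         for c in comps:
--             if c & nbrs:
--                 merged |= c
--             else:
--                 rest.append(c)
--         comps = rest + [merged]
--     return len(comps)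
-- ===== Notes on version B (the rewrite author's own statement) =====
-- stated objective: alternative
-- what changed: Replaces A's per-point stack-based DFS flood fill (with repeated linear membership scans of perims) by a single pass over the points that keeps an explicit list of component sets and merges every component touching a new point's four neighbours, returning the number of component sets left.
import Mathlib
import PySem

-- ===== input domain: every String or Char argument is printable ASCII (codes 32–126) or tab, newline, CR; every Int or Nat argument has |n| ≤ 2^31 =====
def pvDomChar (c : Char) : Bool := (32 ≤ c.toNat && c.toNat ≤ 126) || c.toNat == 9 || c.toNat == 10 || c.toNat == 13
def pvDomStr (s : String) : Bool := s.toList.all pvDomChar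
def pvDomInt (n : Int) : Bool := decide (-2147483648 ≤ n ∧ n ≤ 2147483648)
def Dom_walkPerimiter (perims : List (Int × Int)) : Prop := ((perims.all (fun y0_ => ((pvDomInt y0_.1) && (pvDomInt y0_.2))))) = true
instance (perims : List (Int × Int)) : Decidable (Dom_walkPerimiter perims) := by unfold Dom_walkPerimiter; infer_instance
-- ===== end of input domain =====

-- B replaces A's stack flood fill by incremental merging of explicit component
-- sets over the points (objective: alternative); same value on every set input.

-- ===== PORT A =====
def pvDirs : List (Int × Int) := [(0, -1), (1, 0), (0, 1), (-1, 0)]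

-- one neighbour test/push of the Python while-loop body (toWalk.append + pwalked.add)
def pvStepA (perims : List (Int × Int)) (x : Int × Int)
    (s : List (Int × Int) × PySem.Set (Int × Int)) (d : Int × Int) :
    List (Int × Int) × PySem.Set (Int × Int) :=
  let n := (x.1 + d.1, x.2 + d.2)
  if n ∈ perims ∧ n ∉ s.2 then (n :: s.1, PySem.Set.add s.2 n) else s

-- termination measure of the while loop: |toWalk| + 2·|distinct perim points not yet in pwalked|
def pvUnmarked (perims : List (Int × Int)) (V : PySem.Set (Int × Int)) : Nat :=
  (PySem.List.dedup perims).countP (fun p => ! PySem.Set.contains V p)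

-- countP drops by one when the predicate flips at exactly one member of a Nodup list
theorem pvCountP_flip {α : Type} (l : List α) (a : α) (p q : α → Bool)
    (hnd : l.Nodup) (ha : a ∈ l) (hpa : p a = true) (hqa : q a = false)
    (h : ∀ b ∈ l, b ≠ a → q b = p b) :
    l.countP q + 1 = l.countP p := by
  induction l with
  | nil => cases ha
  | cons x xs ih =>
    simp only [List.countP_cons]
    rcases List.mem_cons.mp ha with rfl | hmem
    · have hall : ∀ b ∈ xs, q b = p b := by
        intro b hb
        exact h b (List.mem_cons_of_mem _ hb) (fun hba => (List.nodup_cons.mp hnd).1 (hba ▸ hb))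
      have hcc : xs.countP q = xs.countP p :=
        List.countP_congr (by intro b hb; rw [hall b hb])
      simp [hpa, hqa, hcc]
    · have hxa : x ≠ a := fun hxa => (List.nodup_cons.mp hnd).1 (hxa ▸ hmem)
      have hx : q x = p x := h x List.mem_cons_self hxa
      have hrec := ih (List.nodup_cons.mp hnd).2 hmem
        (fun b hb hba => h b (List.mem_cons_of_mem _ hb) hba)
      rw [hx]
      cases hpx : p x <;> simp <;> omega

theorem pvStepA_mu (perims : List (Int × Int)) (x : Int × Int)
    (s : List (Int × Int) × PySem.Set (Int × Int)) (d : Int × Int) :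
    (pvStepA perims x s d).1.length + 2 * pvUnmarked perims (pvStepA perims x s d).2 ≤
      s.1.length + 2 * pvUnmarked perims s.2 := by
  unfold pvStepA
  set n := (x.1 + d.1, x.2 + d.2) with hn
  by_cases hc : n ∈ perims ∧ n ∉ s.2
  · rw [if_pos hc]
    have hdrop : pvUnmarked perims (PySem.Set.add s.2 n) + 1 = pvUnmarked perims s.2 := by
      apply pvCountP_flip (a := n)
      · exact PySem.List.nodup_dedup _
      · exact (PySem.List.mem_dedup _ _).mpr hc.1
      · simp [hc.2]
      · simp [(PySem.Set.mem_add s.2 n n).mpr (Or.inr rfl)]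
      · intro b _ hb
        simp [PySem.Set.mem_add, hb]
    simp only [List.length_cons]
    omega
  · rw [if_neg hc]

theorem pvFoldMu (perims : List (Int × Int)) (x : Int × Int) :
    ∀ (ds : List (Int × Int)) (st : List (Int × Int)) (V : PySem.Set (Int × Int)),
    (ds.foldl (pvStepA perims x) (st, V)).1.length +
        2 * pvUnmarked perims (ds.foldl (pvStepA perims x) (st, V)).2 ≤
      st.length + 2 * pvUnmarked perims V := by
  intro ds
  induction ds with
  | nil => intro st V; simp
  | cons d ds ih =>
    intro st V
    have h1 := ih (pvStepA perims x (st, V) d).1 (pvStepA perims x (st, V) d).2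
    have h2 := pvStepA_mu perims x (st, V) d
    simp only [List.foldl_cons] at *
    calc _ ≤ _ := h1
      _ ≤ _ := h2

-- the Python while-loop; the stack is held top-first (Python appends/pops at the right end)
def pvFloodA (perims : List (Int × Int)) :
    List (Int × Int) → PySem.Set (Int × Int) → PySem.Set (Int × Int)
  | [], V => V
  | x :: st, V =>
    let s := pvDirs.foldl (pvStepA perims x) (st, V)
    pvFloodA perims s.1 s.2
termination_by st V => st.length + 2 * pvUnmarked perims V
decreasing_by
  have := pvFoldMu perims x pvDirs st V
  simp only [List.length_cons]
  omega

-- body of the Python for-loop over perims (state: pwalked, sides)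
def pvOuterF (perims : List (Int × Int)) (acc : PySem.Set (Int × Int) × Int)
    (p : Int × Int) : PySem.Set (Int × Int) × Int :=
  if p ∈ acc.1 then acc else (pvFloodA perims [p] acc.1, acc.2 + 1)

def walkPerimiter (perims : List (Int × Int)) : Int :=
  (perims.foldl (pvOuterF perims) (PySem.Set.empty, 0)).2

-- ===== PORT B =====
-- the four neighbour points {(x,y-1),(x+1,y),(x,y+1),(x-1,y)} of p
def pvNbrs (p : Int × Int) : PySem.Set (Int × Int) :=
  PySem.Set.ofList [(p.1, p.2 - 1), (p.1 + 1, p.2), (p.1, p.2 + 1), (p.1 - 1, p.2)]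

-- body of B's inner loop: route c into merged (if it meets nbrs) or rest
def pvMergeF (nbrs : PySem.Set (Int × Int))
    (acc : List (PySem.Set (Int × Int)) × PySem.Set (Int × Int))
    (c : PySem.Set (Int × Int)) :
    List (PySem.Set (Int × Int)) × PySem.Set (Int × Int) :=
  if PySem.Set.inter c nbrs ≠ [] then (acc.1, PySem.Set.union acc.2 c)
  else (acc.1 ++ [c], acc.2)

-- body of B's outer loop: absorb one fresh point into the component list
def pvAddPoint (comps : List (PySem.Set (Int × Int))) (p : Int × Int) :
    List (PySem.Set (Int × Int)) :=
  let nbrs := pvNbrs p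
  let s := comps.foldl (pvMergeF nbrs) ([], PySem.Set.ofList [p])
  s.1 ++ [s.2]

def walkPerimiter_alt (perims : List (Int × Int)) : Int :=
  ((PySem.List.dedup perims).foldl pvAddPoint []).length

-- ===== PRECONDITION & SPEC =====
-- The Python argument is a set of pairs (py type set[tuple[int, int]]), ported as a list of
-- DISTINCT elements; Pre_ states exactly that representation invariant (a list with a
-- duplicated element encodes no Python input).
def Pre_walkPerimiter (perims : List (Int × Int)) : Prop := perims.Nodup
instance (perims : List (Int × Int)) : Decidable (Pre_walkPerimiter perims) := by
  unfold Pre_walkPerimiter; infer_instance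

def pvWitness_walkPerimiter : (List (Int × Int)) := [(0, 0), (1, 0), (5, 5)]

def Spec_walkPerimiter (perims : List (Int × Int)) (out : Int) : Prop :=
  out = walkPerimiter_alt perims
instance (perims : List (Int × Int)) (out : Int) : Decidable (Spec_walkPerimiter perims out) := by
  unfold Spec_walkPerimiter; infer_instance

-- ===== CLAIM (what is proved, stated in full; the proofs are below) =====
def Claim_equal_walkPerimiter : Prop :=
  ∀ (perims : List (Int × Int)), Dom_walkPerimiter perims → Pre_walkPerimiter perims →
    Spec_walkPerimiter perims (walkPerimiter perims)

-- ===== LEMMAS AND PROOFS =====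

-- ---- the adjacency relation and reachability within a finite point set ----
def pvAdj (p q : Int × Int) : Prop := q ∈ pvNbrs p

theorem pvAdj_cases (p q : Int × Int) :
    pvAdj p q ↔ q = (p.1, p.2 - 1) ∨ q = (p.1 + 1, p.2) ∨ q = (p.1, p.2 + 1) ∨ q = (p.1 - 1, p.2) := by
  simp [pvAdj, pvNbrs, PySem.Set.mem_ofList]

theorem pvAdj_symm {p q : Int × Int} (h : pvAdj p q) : pvAdj q p := by
  rw [pvAdj_cases] at h ⊢
  rcases h with h | h | h | h <;> subst h <;> simp [Prod.ext_iff]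

theorem pvAdj_ne {p q : Int × Int} (h : pvAdj p q) : q ≠ p := by
  rw [pvAdj_cases] at h
  rcases h with h | h | h | h <;> subst h <;> simp [Prod.ext_iff]

def pvStepR (S : Finset (Int × Int)) (u v : Int × Int) : Prop :=
  u ∈ S ∧ v ∈ S ∧ pvAdj u v

def pvReach (S : Finset (Int × Int)) (a b : Int × Int) : Prop :=
  Relation.ReflTransGen (pvStepR S) a b

theorem pvReach_symm {S : Finset (Int × Int)} {a b : Int × Int}
    (h : pvReach S a b) : pvReach S b a :=
  Relation.ReflTransGen.symmetric (fun _ _ h => ⟨h.2.1, h.1, pvAdj_symm h.2.2⟩) h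

theorem pvReach_trans {S : Finset (Int × Int)} {a b c : Int × Int}
    (h1 : pvReach S a b) (h2 : pvReach S b c) : pvReach S a c :=
  Relation.ReflTransGen.trans h1 h2

def pvHasNbr (S : Finset (Int × Int)) (p : Int × Int) : Prop :=
  ∃ q ∈ S, pvAdj p q

theorem pvReach_mem_right {S : Finset (Int × Int)} {a b : Int × Int}
    (h : pvReach S a b) : b = a ∨ b ∈ S := by
  induction h with
  | refl => exact Or.inl rfl
  | tail _ hstep _ => exact Or.inr hstep.2.1

theorem pvReach_hasNbr_right {S : Finset (Int × Int)} {a b : Int × Int}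
    (h : pvReach S a b) (hne : b ≠ a) : pvHasNbr S b := by
  rcases Relation.ReflTransGen.cases_tail h with h' | ⟨c, _, hstep⟩
  · exact absurd h' hne
  · exact ⟨c, hstep.1, pvAdj_symm hstep.2.2⟩

theorem pvReach_hasNbr_left {S : Finset (Int × Int)} {a b : Int × Int}
    (h : pvReach S a b) (hne : b ≠ a) : pvHasNbr S a :=
  pvReach_hasNbr_right (pvReach_symm h) (fun h' => hne h'.symm)

noncomputable def pvClass (S : Finset (Int × Int)) (a : Int × Int) : Finset (Int × Int) :=
  @Finset.filter _ (fun b => pvReach S a b) (Classical.decPred _) S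

theorem mem_pvClass {S : Finset (Int × Int)} {a b : Int × Int} :
    b ∈ pvClass S a ↔ b ∈ S ∧ pvReach S a b := by
  simp [pvClass, Finset.mem_filter]

theorem pvClass_eq_of_reach {S : Finset (Int × Int)} {a b : Int × Int}
    (h : pvReach S a b) : pvClass S a = pvClass S b := by
  ext c
  simp only [mem_pvClass]
  exact ⟨fun ⟨hc, hr⟩ => ⟨hc, pvReach_trans (pvReach_symm h) hr⟩,
         fun ⟨hc, hr⟩ => ⟨hc, pvReach_trans h hr⟩⟩

theorem mem_pvClass_self {S : Finset (Int × Int)} {a : Int × Int} (h : a ∈ S) :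
    a ∈ pvClass S a := mem_pvClass.mpr ⟨h, Relation.ReflTransGen.refl⟩

-- ---- A-side: characterisation of the flood fill ----

theorem pvAdj_shift (x p : Int × Int) :
    (∃ d ∈ pvDirs, p = (x.1 + d.1, x.2 + d.2)) ↔ pvAdj x p := by
  rw [pvAdj_cases]
  simp only [pvDirs, List.mem_cons, List.not_mem_nil, or_false]
  constructor
  · rintro ⟨d, (rfl | rfl | rfl | rfl), rfl⟩ <;> simp <;> omega
  · rintro (rfl | rfl | rfl | rfl)
    · exact ⟨(0, -1), by simp, by simp [Prod.ext_iff]; try omega⟩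
    · exact ⟨(1, 0), by simp, by simp; try omega⟩
    · exact ⟨(0, 1), by simp, by simp; try omega⟩
    · exact ⟨(-1, 0), by simp, by simp; try omega⟩

theorem pvStepA_facts (perims : List (Int × Int)) (x : Int × Int)
    (s : List (Int × Int) × PySem.Set (Int × Int)) (d : Int × Int) :
    (∀ p ∈ s.2, p ∈ (pvStepA perims x s d).2) ∧
    (∀ p ∈ s.1, p ∈ (pvStepA perims x s d).1) ∧
    (∀ p ∈ (pvStepA perims x s d).2, p ∈ s.2 ∨ (p ∈ perims ∧ p = (x.1 + d.1, x.2 + d.2))) ∧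
    (∀ p ∈ (pvStepA perims x s d).1, p ∈ s.1 ∨ (p ∈ perims ∧ p = (x.1 + d.1, x.2 + d.2))) ∧
    ((x.1 + d.1, x.2 + d.2) ∈ perims → (x.1 + d.1, x.2 + d.2) ∈ (pvStepA perims x s d).2) ∧
    (∀ p ∈ (pvStepA perims x s d).2, p ∈ s.2 ∨ p ∈ (pvStepA perims x s d).1) := by
  unfold pvStepA
  by_cases hc : (x.1 + d.1, x.2 + d.2) ∈ perims ∧ (x.1 + d.1, x.2 + d.2) ∉ s.2
  · rw [if_pos hc]
    refine ⟨?_, ?_, ?_, ?_, ?_, ?_⟩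
    · intro p hp; exact (PySem.Set.mem_add _ _ _).mpr (Or.inl hp)
    · intro p hp; exact List.mem_cons_of_mem _ hp
    · intro p hp
      rcases (PySem.Set.mem_add _ _ _).mp hp with h | h
      · exact Or.inl h
      · exact Or.inr ⟨h ▸ hc.1, h⟩
    · intro p hp
      rcases List.mem_cons.mp hp with h | h
      · exact Or.inr ⟨h ▸ hc.1, h⟩
      · exact Or.inl h
    · intro _; exact (PySem.Set.mem_add _ _ _).mpr (Or.inr rfl)
    · intro p hp
      rcases (PySem.Set.mem_add _ _ _).mp hp with h | h
      · exact Or.inl h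
      · exact Or.inr (h ▸ List.mem_cons_self)
  · rw [if_neg hc]
    refine ⟨fun p hp => hp, fun p hp => hp, fun p hp => Or.inl hp, fun p hp => Or.inl hp, ?_, fun p hp => Or.inl hp⟩
    intro hmem
    rcases not_and_or.mp hc with h | h
    · exact absurd hmem h
    · exact not_not.mp h

theorem pvFold_facts (perims : List (Int × Int)) (x : Int × Int) :
    ∀ (ds : List (Int × Int)) (st : List (Int × Int)) (V : PySem.Set (Int × Int)),
    (∀ p ∈ V, p ∈ (ds.foldl (pvStepA perims x) (st, V)).2) ∧
    (∀ p ∈ st, p ∈ (ds.foldl (pvStepA perims x) (st, V)).1) ∧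
    (∀ p ∈ (ds.foldl (pvStepA perims x) (st, V)).2,
       p ∈ V ∨ (p ∈ perims ∧ ∃ d ∈ ds, p = (x.1 + d.1, x.2 + d.2))) ∧
    (∀ p ∈ (ds.foldl (pvStepA perims x) (st, V)).1,
       p ∈ st ∨ (p ∈ perims ∧ ∃ d ∈ ds, p = (x.1 + d.1, x.2 + d.2))) ∧
    (∀ d ∈ ds, (x.1 + d.1, x.2 + d.2) ∈ perims →
       (x.1 + d.1, x.2 + d.2) ∈ (ds.foldl (pvStepA perims x) (st, V)).2) ∧
    (∀ p ∈ (ds.foldl (pvStepA perims x) (st, V)).2,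
       p ∈ V ∨ p ∈ (ds.foldl (pvStepA perims x) (st, V)).1) := by
  intro ds
  induction ds with
  | nil =>
    intro st V
    exact ⟨fun p hp => hp, fun p hp => hp, fun p hp => Or.inl hp, fun p hp => Or.inl hp,
      fun d hd => absurd hd List.not_mem_nil, fun p hp => Or.inl hp⟩
  | cons d ds ih =>
    intro st V
    simp only [List.foldl_cons]
    obtain ⟨s1, s2, s3, s4, s5, s6⟩ := pvStepA_facts perims x (st, V) d
    obtain ⟨i1, i2, i3, i4, i5, i6⟩ := ih (pvStepA perims x (st, V) d).1 (pvStepA perims x (st, V) d).2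
    simp only [Prod.mk.eta] at i1 i2 i3 i4 i5 i6
    refine ⟨?_, ?_, ?_, ?_, ?_, ?_⟩
    · intro p hp; exact i1 p (s1 p hp)
    · intro p hp; exact i2 p (s2 p hp)
    · intro p hp
      rcases i3 p hp with h | ⟨hperim, d', hd', rfl⟩
      · rcases s3 p h with h' | ⟨hperim, h'⟩
        · exact Or.inl h'
        · exact Or.inr ⟨hperim, d, List.mem_cons_self, h'⟩
      · exact Or.inr ⟨hperim, d', List.mem_cons_of_mem _ hd', rfl⟩
    · intro p hp
      rcases i4 p hp with h | ⟨hperim, d', hd', rfl⟩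
      · rcases s4 p h with h' | ⟨hperim, h'⟩
        · exact Or.inl h'
        · exact Or.inr ⟨hperim, d, List.mem_cons_self, h'⟩
      · exact Or.inr ⟨hperim, d', List.mem_cons_of_mem _ hd', rfl⟩
    · intro d' hd' hperim
      rcases List.mem_cons.mp hd' with rfl | hd'
      · exact i1 _ (s5 hperim)
      · exact i5 d' hd' hperim
    · intro p hp
      rcases i6 p hp with h | h
      · rcases s6 p h with h' | h'
        · exact Or.inl h'
        · exact Or.inr (i2 p h')
      · exact Or.inr h

def pvCls (perims : List (Int × Int)) (t p : Int × Int) : Prop :=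
  p ∈ perims ∧ pvReach perims.toFinset t p ∧ pvHasNbr perims.toFinset p

theorem pvFloodA_char (perims : List (Int × Int)) (s0 : Int × Int) (hs0 : s0 ∈ perims) :
    ∀ (st : List (Int × Int)) (V : PySem.Set (Int × Int)),
    (∀ p ∈ st, p ∈ perims ∧ pvReach perims.toFinset s0 p) →
    (∀ q, (q ∈ V ∨ q = s0) → q ∉ st → ∀ p, p ∈ perims → pvAdj q p → p ∈ V) →
    (∀ p ∈ V, p ∈ pvFloodA perims st V) ∧
    (∀ p ∈ pvFloodA perims st V, p ∈ V ∨ pvCls perims s0 p) ∧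
    (∀ q, (q ∈ pvFloodA perims st V ∨ q = s0) → ∀ p, p ∈ perims → pvAdj q p →
       p ∈ pvFloodA perims st V) := by
  intro st V
  induction st, V using pvFloodA.induct perims with
  | case1 V =>
    intro _ h2
    simp only [pvFloodA]
    refine ⟨fun p hp => hp, fun p hp => Or.inl hp, ?_⟩
    intro q hq p hperim hadj
    exact h2 q hq List.not_mem_nil p hperim hadj
  | case2 x st V sacc ih =>
    intro h1 h2
    simp only [pvFloodA]
    obtain ⟨f1, f2, f3, f4, f5, f6⟩ := pvFold_facts perims x pvDirs st V
    have hx : x ∈ perims ∧ pvReach perims.toFinset s0 x := h1 x List.mem_cons_self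
    have hreach_push : ∀ p, p ∈ perims → pvAdj x p → pvReach perims.toFinset s0 p := by
      intro p hp hadj
      exact Relation.ReflTransGen.tail hx.2
        ⟨List.mem_toFinset.mpr hx.1, List.mem_toFinset.mpr hp, hadj⟩
    have H1' : ∀ p ∈ (pvDirs.foldl (pvStepA perims x) (st, V)).1,
        p ∈ perims ∧ pvReach perims.toFinset s0 p := by
      intro p hp
      rcases f4 p hp with h | ⟨hperim, d, hd, rfl⟩
      · exact h1 p (List.mem_cons_of_mem _ h)
      · have hadj : pvAdj x _ := (pvAdj_shift x _).mp ⟨d, hd, rfl⟩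
        exact ⟨hperim, hreach_push _ hperim hadj⟩
    have H2' : ∀ q, (q ∈ (pvDirs.foldl (pvStepA perims x) (st, V)).2 ∨ q = s0) →
        q ∉ (pvDirs.foldl (pvStepA perims x) (st, V)).1 →
        ∀ p, p ∈ perims → pvAdj q p → p ∈ (pvDirs.foldl (pvStepA perims x) (st, V)).2 := by
      intro q hq hqst p hperim hadj
      have hnbr : ∀ r, pvAdj x r → r ∈ perims → r ∈ (pvDirs.foldl (pvStepA perims x) (st, V)).2 := by
        intro r hadjr hrp
        obtain ⟨d, hd, rfl⟩ := (pvAdj_shift x r).mpr hadjr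
        exact f5 d hd hrp
      by_cases hqx : q = x
      · exact hnbr p (hqx ▸ hadj) hperim
      · have hqV : q ∈ V ∨ q = s0 := by
          rcases hq with hq | rfl
          · rcases f6 q hq with h | h
            · exact Or.inl h
            · exact absurd h hqst
          · exact Or.inr rfl
        have hqst' : q ∉ x :: st := by
          intro hmem
          rcases List.mem_cons.mp hmem with h | h
          · exact hqx h
          · exact hqst (f2 q h)
        exact f1 p (h2 q hqV hqst' p hperim hadj)
    obtain ⟨c1, c2, c3⟩ := ih H1' H2'
    refine ⟨?_, ?_, ?_⟩
    · intro p hp; exact c1 p (f1 p hp)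
    · intro p hp
      rcases c2 p hp with h | h
      · rcases f3 p h with h' | ⟨hperim, d, hd, rfl⟩
        · exact Or.inl h'
        · have hadj : pvAdj x _ := (pvAdj_shift x _).mp ⟨d, hd, rfl⟩
          exact Or.inr ⟨hperim, hreach_push _ hperim hadj,
            ⟨x, List.mem_toFinset.mpr hx.1, pvAdj_symm hadj⟩⟩
      · exact Or.inr h
    · exact c3

theorem pvFlood_members (perims : List (Int × Int)) (s0 : Int × Int) (hs0 : s0 ∈ perims)
    (V : PySem.Set (Int × Int))
    (hcl : ∀ q ∈ V, ∀ p, p ∈ perims → pvAdj q p → p ∈ V) :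
    ∀ p, p ∈ pvFloodA perims [s0] V ↔ p ∈ V ∨ pvCls perims s0 p := by
  obtain ⟨c1, c2, c3⟩ := pvFloodA_char perims s0 hs0 [s0] V
    (by intro p hp
        rcases List.mem_cons.mp hp with rfl | h
        · exact ⟨hs0, Relation.ReflTransGen.refl⟩
        · exact absurd h List.not_mem_nil)
    (by intro q hq hqst p hperim hadj
        rcases hq with hq | rfl
        · exact hcl q hq p hperim hadj
        · exact absurd List.mem_cons_self hqst)
  have aux : ∀ p, pvReach perims.toFinset s0 p → p = s0 ∨ p ∈ pvFloodA perims [s0] V := by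
    intro p hr
    induction hr with
    | refl => exact Or.inl rfl
    | tail hbc hstep ih =>
      rename_i b c
      have hcper : c ∈ perims := List.mem_toFinset.mp hstep.2.1
      rcases ih with rfl | h
      · exact Or.inr (c3 _ (Or.inr rfl) c hcper hstep.2.2)
      · exact Or.inr (c3 _ (Or.inl h) c hcper hstep.2.2)
  intro p
  constructor
  · exact c2 p
  · rintro (hp | ⟨hperim, hr, hnb⟩)
    · exact c1 p hp
    · rcases aux p hr with rfl | h
      · obtain ⟨q, hqS, hadj⟩ := hnb
        have hq : pvReach perims.toFinset p q :=
          Relation.ReflTransGen.single ⟨List.mem_toFinset.mpr hperim, hqS, hadj⟩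
        rcases aux q hq with rfl | hqF
        · exact absurd rfl (pvAdj_ne hadj)
        · exact c3 q (Or.inl hqF) p hperim (pvAdj_symm hadj)
      · exact h

-- ---- A-side: the outer loop ----
noncomputable def pvNI (perims L : List (Int × Int)) : Finset (Int × Int) :=
  @Finset.filter _ (fun p => pvHasNbr perims.toFinset p) (Classical.decPred _) L.toFinset

def pvIsoB (perims : List (Int × Int)) (p : Int × Int) : Bool :=
  ! (pvNbrs p).any (fun q => q ∈ perims)

theorem pvIsoB_iff (perims : List (Int × Int)) (p : Int × Int) :
    pvIsoB perims p = true ↔ ¬ pvHasNbr perims.toFinset p := by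
  unfold pvIsoB pvHasNbr pvAdj
  simp only [Bool.not_eq_eq_eq_not, Bool.not_true, List.any_eq_false,
    decide_eq_false_iff_not, List.mem_toFinset, Bool.not_eq_true]
  constructor
  · rintro h ⟨q, hqS, hadj⟩
    exact h q hadj hqS
  · intro h q hq hmem
    exact h ⟨q, hmem, hq⟩

theorem pvCls_closed (perims : List (Int × Int)) (L : List (Int × Int))
    (V : PySem.Set (Int × Int))
    (hm : ∀ p, p ∈ V ↔ ∃ t ∈ L, pvCls perims t p) :
    ∀ q ∈ V, ∀ p, p ∈ perims → pvAdj q p → p ∈ V := by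
  intro q hq p hperim hadj
  obtain ⟨t0, ht0, hqper, hreach, _⟩ := (hm q).mp hq
  refine (hm p).mpr ⟨t0, ht0, hperim, ?_, ⟨q, List.mem_toFinset.mpr hqper, pvAdj_symm hadj⟩⟩
  exact Relation.ReflTransGen.tail hreach
    ⟨List.mem_toFinset.mpr hqper, List.mem_toFinset.mpr hperim, hadj⟩

theorem pvIsoB_false (perims : List (Int × Int)) (p : Int × Int)
    (h : pvHasNbr perims.toFinset p) : pvIsoB perims p = false := by
  rcases Bool.eq_false_or_eq_true (pvIsoB perims p) with ht | hf
  · exact absurd h ((pvIsoB_iff perims p).mp ht)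
  · exact hf

theorem pvNI_append_nb (perims L : List (Int × Int)) (t : Int × Int)
    (h : pvHasNbr perims.toFinset t) :
    pvNI perims (L ++ [t]) = insert t (pvNI perims L) := by
  unfold pvNI
  have hl : (L ++ [t]).toFinset = insert t L.toFinset := by
    ext a; simp [List.mem_toFinset]
  rw [hl, Finset.filter_insert, if_pos h]

theorem pvNI_append_iso (perims L : List (Int × Int)) (t : Int × Int)
    (h : ¬ pvHasNbr perims.toFinset t) :
    pvNI perims (L ++ [t]) = pvNI perims L := by
  unfold pvNI
  have hl : (L ++ [t]).toFinset = insert t L.toFinset := by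
    ext a; simp [List.mem_toFinset]
  rw [hl, Finset.filter_insert, if_neg h]

theorem mem_pvNI {perims L : List (Int × Int)} {p : Int × Int} :
    p ∈ pvNI perims L ↔ p ∈ L.toFinset ∧ pvHasNbr perims.toFinset p := by
  unfold pvNI
  exact @Finset.mem_filter _ _ (Classical.decPred _) _ _

theorem pvOuter_step (perims L : List (Int × Int)) (acc : PySem.Set (Int × Int) × Int)
    (t : Int × Int) (ht : t ∈ perims) (_hL : ∀ t' ∈ L, t' ∈ perims)
    (hm : ∀ p, p ∈ acc.1 ↔ ∃ t' ∈ L, pvCls perims t' p)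
    (hc : acc.2 = ((pvNI perims L).image (pvClass perims.toFinset)).card +
      (L.countP (pvIsoB perims) : Int)) :
    (∀ p, p ∈ (pvOuterF perims acc t).1 ↔ ∃ t' ∈ L ++ [t], pvCls perims t' p) ∧
    (pvOuterF perims acc t).2 =
      ((pvNI perims (L ++ [t])).image (pvClass perims.toFinset)).card +
        ((L ++ [t]).countP (pvIsoB perims) : Int) := by
  have hScls : ∀ {a b : Int × Int}, pvReach perims.toFinset a b → a ≠ b →
      pvHasNbr perims.toFinset a := fun h hne => pvReach_hasNbr_left h (fun e => hne e.symm)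
  unfold pvOuterF
  by_cases hin : t ∈ acc.1
  · rw [if_pos hin]
    obtain ⟨t1, ht1, _, hreach1, hnb_t⟩ := (hm t).mp hin
    have hnbt : pvHasNbr perims.toFinset t := hnb_t
    constructor
    · intro p
      rw [hm p]
      constructor
      · rintro ⟨t', ht', hcls⟩; exact ⟨t', List.mem_append_left _ ht', hcls⟩
      · rintro ⟨t', ht', hcls⟩
        rcases List.mem_append.mp ht' with h | h
        · exact ⟨t', h, hcls⟩
        · have : t' = t := by simpa using h
          subst this
          exact ⟨t1, ht1, hcls.1, pvReach_trans hreach1 hcls.2.1, hcls.2.2⟩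
    · rw [pvNI_append_nb perims L t hnbt]
      have ht1nb : pvHasNbr perims.toFinset t1 := by
        by_cases he : t1 = t
        · exact he ▸ hnbt
        · exact hScls hreach1 he
      have ht1NI : t1 ∈ pvNI perims L :=
        mem_pvNI.mpr ⟨List.mem_toFinset.mpr ht1, ht1nb⟩
      have hclseq : pvClass perims.toFinset t = pvClass perims.toFinset t1 :=
        (pvClass_eq_of_reach hreach1).symm
      rw [Finset.image_insert,
        Finset.insert_eq_self.mpr (Finset.mem_image.mpr ⟨t1, ht1NI, hclseq.symm⟩)]
      rw [List.countP_append]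
      simp [pvIsoB_false perims t hnbt, hc]
  · rw [if_neg hin]
    have hfl := pvFlood_members perims t ht acc.1 (pvCls_closed perims L acc.1 hm)
    have hmem' : ∀ p, p ∈ pvFloodA perims [t] acc.1 ↔ ∃ t' ∈ L ++ [t], pvCls perims t' p := by
      intro p
      rw [hfl p, hm p]
      constructor
      · rintro (⟨t', ht', hcls⟩ | hcls)
        · exact ⟨t', List.mem_append_left _ ht', hcls⟩
        · exact ⟨t, List.mem_append_right _ (by simp), hcls⟩
      · rintro ⟨t', ht', hcls⟩
        rcases List.mem_append.mp ht' with h | h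
        · exact Or.inl ⟨t', h, hcls⟩
        · have : t' = t := by simpa using h
          exact Or.inr (this ▸ hcls)
    refine ⟨hmem', ?_⟩
    rw [List.countP_append]
    by_cases hnbt : pvHasNbr perims.toFinset t
    · have hnew : pvClass perims.toFinset t ∉ (pvNI perims L).image (pvClass perims.toFinset) := by
        rw [Finset.mem_image]
        rintro ⟨t1, ht1NI, heq⟩
        have ht1L : t1 ∈ L := List.mem_toFinset.mp (mem_pvNI.mp ht1NI).1
        have : t ∈ pvClass perims.toFinset t1 := heq ▸ mem_pvClass_self (List.mem_toFinset.mpr ht)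
        have hreach : pvReach perims.toFinset t1 t := (mem_pvClass.mp this).2
        exact hin ((hm t).mpr ⟨t1, ht1L, ht, hreach, hnbt⟩)
      rw [pvNI_append_nb perims L t hnbt, Finset.image_insert,
        Finset.card_insert_of_notMem hnew]
      simp [pvIsoB_false perims t hnbt, hc]
      omega
    · rw [pvNI_append_iso perims L t hnbt]
      have hiso : pvIsoB perims t = true := by
        rw [pvIsoB_iff]; exact hnbt
      simp [hiso, hc]
      omega

theorem pvOuter_inv (perims : List (Int × Int)) :
    ∀ (M L : List (Int × Int)) (acc : PySem.Set (Int × Int) × Int),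
    (∀ t ∈ M, t ∈ perims) → (∀ t ∈ L, t ∈ perims) →
    (∀ p, p ∈ acc.1 ↔ ∃ t ∈ L, pvCls perims t p) →
    acc.2 = ((pvNI perims L).image (pvClass perims.toFinset)).card + (L.countP (pvIsoB perims) : Int) →
    (∀ p, p ∈ (M.foldl (pvOuterF perims) acc).1 ↔ ∃ t ∈ L ++ M, pvCls perims t p) ∧
    (M.foldl (pvOuterF perims) acc).2 =
      ((pvNI perims (L ++ M)).image (pvClass perims.toFinset)).card +
        ((L ++ M).countP (pvIsoB perims) : Int) := by
  intro M
  induction M with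
  | nil =>
    intro L acc _ _ hm hc
    simp only [List.foldl_nil, List.append_nil]
    exact ⟨hm, hc⟩
  | cons t M ih =>
    intro L acc hM hL hm hc
    simp only [List.foldl_cons]
    obtain ⟨hm', hc'⟩ := pvOuter_step perims L acc t (hM t List.mem_cons_self) hL hm hc
    have := ih (L ++ [t]) (pvOuterF perims acc t)
      (fun t' ht' => hM t' (List.mem_cons_of_mem _ ht'))
      (by intro t' ht'
          rcases List.mem_append.mp ht' with h | h
          · exact hL t' h
          · exact (by simpa using h : t' = t) ▸ hM t List.mem_cons_self)
      hm' hc'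
    simpa [List.append_assoc] using this

theorem pvA_val (perims : List (Int × Int)) :
    walkPerimiter perims =
      ((pvNI perims perims).image (pvClass perims.toFinset)).card +
        (perims.countP (pvIsoB perims) : Int) := by
  unfold walkPerimiter
  obtain ⟨_, h⟩ := pvOuter_inv perims perims [] (PySem.Set.empty, 0)
    (fun t ht => ht) (by simp)
    (by intro p; simp [PySem.Set.empty])
    (by simp [pvNI])
  simpa using h

-- ---- B-side: vertex insertion and the merge loop ----

theorem pvReach_mono {T : Finset (Int × Int)} {p : Int × Int} {a b : Int × Int}
    (h : pvReach T a b) : pvReach (insert p T) a b := by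
  refine Relation.ReflTransGen.mono ?_ h
  intro u v hv
  exact ⟨Finset.mem_insert_of_mem hv.1, Finset.mem_insert_of_mem hv.2.1, hv.2.2⟩

theorem pvReach_insert_from {T : Finset (Int × Int)} {p r : Int × Int} (hp : p ∉ T)
    (h : pvReach (insert p T) p r) :
    r = p ∨ ∃ n, n ∈ T ∧ pvAdj p n ∧ pvReach T n r := by
  induction h with
  | refl => exact Or.inl rfl
  | tail hb hstep ih =>
    rename_i b c
    rcases ih with rfl | ⟨n, hn, hadj, hr⟩
    · have hcp : c ≠ b := pvAdj_ne hstep.2.2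
      have hcT : c ∈ T := by
        rcases Finset.mem_insert.mp hstep.2.1 with h | h
        · exact absurd h hcp
        · exact h
      exact Or.inr ⟨c, hcT, hstep.2.2, Relation.ReflTransGen.refl⟩
    · by_cases hcp : c = p
      · exact Or.inl hcp
      · have hcT : c ∈ T := by
          rcases Finset.mem_insert.mp hstep.2.1 with h | h
          · exact absurd h hcp
          · exact h
        have hbT : b ∈ T := by
          rcases pvReach_mem_right hr with rfl | h
          · exact hn
          · exact h
        exact Or.inr ⟨n, hn, hadj, hr.tail ⟨hbT, hcT, hstep.2.2⟩⟩

theorem pvReach_insert_or {T : Finset (Int × Int)} {p q r : Int × Int} (hp : p ∉ T)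
    (hq : q ∈ T) (h : pvReach (insert p T) q r) :
    pvReach T q r ∨ pvReach (insert p T) q p := by
  induction h with
  | refl => exact Or.inl Relation.ReflTransGen.refl
  | tail hb hstep ih =>
    rename_i b c
    rcases ih with hl | hr
    · by_cases hcp : c = p
      · right
        subst hcp
        exact (pvReach_mono hl).tail hstep
      · have hcT : c ∈ T := by
          rcases Finset.mem_insert.mp hstep.2.1 with h | h
          · exact absurd h hcp
          · exact h
        have hbT : b ∈ T := by
          rcases pvReach_mem_right hl with rfl | h
          · exact hq
          · exact h
        exact Or.inl (hl.tail ⟨hbT, hcT, hstep.2.2⟩)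
    · exact Or.inr hr

def pvCF (c : List (Int × Int)) : Finset (Int × Int) := c.toFinset

theorem pvInter_ne_iff (c nbrs : PySem.Set (Int × Int)) :
    PySem.Set.inter c nbrs ≠ [] ↔ ∃ x, x ∈ c ∧ x ∈ nbrs := by
  constructor
  · intro h
    obtain ⟨x, hx⟩ := List.exists_mem_of_ne_nil _ h
    exact ⟨x, (PySem.Set.mem_inter c nbrs x).mp hx⟩
  · rintro ⟨x, hxc, hxn⟩
    exact List.ne_nil_of_mem ((PySem.Set.mem_inter c nbrs x).mpr ⟨hxc, hxn⟩)

theorem pvMerge_fold (nbrs : PySem.Set (Int × Int)) :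
    ∀ (comps : List (PySem.Set (Int × Int))) (rest0 : List (PySem.Set (Int × Int)))
      (m0 : PySem.Set (Int × Int)),
    (comps.foldl (pvMergeF nbrs) (rest0, m0)).1 =
      rest0 ++ comps.filter (fun c => decide (PySem.Set.inter c nbrs = [])) ∧
    (∀ x, x ∈ (comps.foldl (pvMergeF nbrs) (rest0, m0)).2 ↔
       x ∈ m0 ∨ ∃ c ∈ comps, PySem.Set.inter c nbrs ≠ [] ∧ x ∈ c) := by
  intro comps
  induction comps with
  | nil => intro rest0 m0; simp
  | cons c cs ih =>
    intro rest0 m0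
    simp only [List.foldl_cons]
    by_cases hc : PySem.Set.inter c nbrs ≠ []
    · have hstep : pvMergeF nbrs (rest0, m0) c = (rest0, PySem.Set.union m0 c) := by
        unfold pvMergeF; rw [if_pos hc]
      rw [hstep]
      obtain ⟨h1, h2⟩ := ih rest0 (PySem.Set.union m0 c)
      constructor
      · rw [h1, List.filter_cons_of_neg (by simpa using hc)]
      · intro x
        rw [h2 x, PySem.Set.mem_union]
        constructor
        · rintro ((h | h) | ⟨c', hc', hne, hx⟩)
          · exact Or.inl h
          · exact Or.inr ⟨c, List.mem_cons_self, hc, h⟩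
          · exact Or.inr ⟨c', List.mem_cons_of_mem _ hc', hne, hx⟩
        · rintro (h | ⟨c', hc', hne, hx⟩)
          · exact Or.inl (Or.inl h)
          · rcases List.mem_cons.mp hc' with rfl | hc'
            · exact Or.inl (Or.inr hx)
            · exact Or.inr ⟨c', hc', hne, hx⟩
    · have hstep : pvMergeF nbrs (rest0, m0) c = (rest0 ++ [c], m0) := by
        unfold pvMergeF; rw [if_neg hc]
      rw [hstep]
      obtain ⟨h1, h2⟩ := ih (rest0 ++ [c]) m0
      constructor
      · rw [h1, List.filter_cons_of_pos (by simpa using not_not.mp hc), List.append_assoc]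
        rfl
      · intro x
        rw [h2 x]
        constructor
        · rintro (h | ⟨c', hc', hne, hx⟩)
          · exact Or.inl h
          · exact Or.inr ⟨c', List.mem_cons_of_mem _ hc', hne, hx⟩
        · rintro (h | ⟨c', hc', hne, hx⟩)
          · exact Or.inl h
          · rcases List.mem_cons.mp hc' with rfl | hc'
            · exact absurd hne hc
            · exact Or.inr ⟨c', hc', hne, hx⟩

theorem pvAddPoint_inv (T : Finset (Int × Int)) (comps : List (PySem.Set (Int × Int)))
    (p : Int × Int) (hp : p ∉ T)
    (hnd : (comps.map pvCF).Nodup)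
    (hmem : ∀ X, X ∈ comps.map pvCF ↔ X ∈ T.image (pvClass T)) :
    ((pvAddPoint comps p).map pvCF).Nodup ∧
    (∀ X, X ∈ (pvAddPoint comps p).map pvCF ↔
       X ∈ (insert p T).image (pvClass (insert p T))) := by
  obtain ⟨hrest, hmerged⟩ := pvMerge_fold (pvNbrs p) comps [] (PySem.Set.ofList [p])
  have hrep : ∀ c ∈ comps, ∃ q ∈ T, pvCF c = pvClass T q := by
    intro c hc
    obtain ⟨q, hq, hcf⟩ := Finset.mem_image.mp ((hmem _).mp (List.mem_map_of_mem hc))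
    exact ⟨q, hq, hcf.symm⟩
  have hsubT : ∀ c ∈ comps, ∀ x ∈ c, x ∈ T := by
    intro c hc x hx
    obtain ⟨q, _, hcf⟩ := hrep c hc
    have : x ∈ pvClass T q := hcf ▸ List.mem_toFinset.mpr hx
    exact (mem_pvClass.mp this).1
  have hclassmem : ∀ q ∈ T, ∃ c ∈ comps, pvCF c = pvClass T q := by
    intro q hq
    have : pvClass T q ∈ comps.map pvCF :=
      (hmem _).mpr (Finset.mem_image.mpr ⟨q, hq, rfl⟩)
    obtain ⟨c, hc, hcf⟩ := List.mem_map.mp this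
    exact ⟨c, hc, hcf⟩
  set s := comps.foldl (pvMergeF (pvNbrs p)) ([], PySem.Set.ofList [p]) with hs
  have haddp : pvAddPoint comps p = s.1 ++ [s.2] := rfl
  -- the merged set is the new class of p
  have hmergedF : pvCF s.2 = pvClass (insert p T) p := by
    apply Finset.ext
    intro x
    rw [pvCF, List.mem_toFinset, hmerged x, mem_pvClass]
    constructor
    · rintro (hx | ⟨c, hc, hne, hx⟩)
      · have : x = p := by simpa [PySem.Set.mem_ofList] using hx
        subst this
        exact ⟨Finset.mem_insert_self _ _, Relation.ReflTransGen.refl⟩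
      · obtain ⟨n, hnc, hnn⟩ := (pvInter_ne_iff c (pvNbrs p)).mp hne
        have hnT : n ∈ T := hsubT c hc n hnc
        have hxT : x ∈ T := hsubT c hc x hx
        obtain ⟨q, hq, hcf⟩ := hrep c hc
        have hrn : pvReach T q n := (mem_pvClass.mp (hcf ▸ List.mem_toFinset.mpr hnc)).2
        have hrx : pvReach T q x := (mem_pvClass.mp (hcf ▸ List.mem_toFinset.mpr hx)).2
        have hnx : pvReach T n x := pvReach_trans (pvReach_symm hrn) hrx
        have hstep1 : pvReach (insert p T) p n :=
          Relation.ReflTransGen.single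
            ⟨Finset.mem_insert_self _ _, Finset.mem_insert_of_mem hnT, hnn⟩
        exact ⟨Finset.mem_insert_of_mem hxT, pvReach_trans hstep1 (pvReach_mono hnx)⟩
    · rintro ⟨hxT', hr⟩
      rcases pvReach_insert_from hp hr with rfl | ⟨n, hnT, hadj, hnr⟩
      · exact Or.inl (by simp [PySem.Set.mem_ofList])
      · obtain ⟨c, hc, hcf⟩ := hclassmem n hnT
        have hnc : n ∈ c := by
          have : n ∈ pvCF c := hcf ▸ mem_pvClass_self hnT
          exact List.mem_toFinset.mp this
        have hxc : x ∈ c := by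
          have : x ∈ pvCF c := hcf ▸ mem_pvClass.mpr
            ⟨(by rcases pvReach_mem_right hnr with rfl | h; exacts [hnT, h]), hnr⟩
          exact List.mem_toFinset.mp this
        exact Or.inr ⟨c, hc, (pvInter_ne_iff _ _).mpr ⟨n, hnc, hadj⟩, hxc⟩
  -- untouched components keep exactly their class
  have huntouched : ∀ c ∈ comps, PySem.Set.inter c (pvNbrs p) = [] →
      ∀ q ∈ T, pvCF c = pvClass T q → pvClass (insert p T) q = pvClass T q := by
    intro c hc hdis q hq hcf
    apply Finset.ext
    intro x
    rw [mem_pvClass, mem_pvClass]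
    constructor
    · rintro ⟨hxT', hr⟩
      rcases pvReach_insert_or hp hq hr with h | h
      · refine ⟨?_, h⟩
        rcases pvReach_mem_right h with rfl | hm
        · exact hq
        · exact hm
      · exfalso
        rcases pvReach_insert_from hp (pvReach_symm h) with he | ⟨n, hnT, hadj, hnq⟩
        · exact hp (he ▸ hq)
        · have hnc : n ∈ c := by
            have : n ∈ pvCF c := hcf ▸ mem_pvClass.mpr ⟨hnT, pvReach_symm hnq⟩
            exact List.mem_toFinset.mp this
          exact (pvInter_ne_iff c (pvNbrs p)).mpr ⟨n, hnc, hadj⟩ hdis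
    · rintro ⟨hxT, hr⟩
      exact ⟨Finset.mem_insert_of_mem hxT, pvReach_mono hr⟩
  have hrest' : s.1 = comps.filter (fun c => decide (PySem.Set.inter c (pvNbrs p) = [])) := by
    rw [hrest]; rfl
  constructor
  · rw [haddp, List.map_append]
    have hnd1 : (s.1.map pvCF).Nodup := by
      rw [hrest']
      exact hnd.sublist (List.Sublist.map pvCF List.filter_sublist)
    refine List.Nodup.append hnd1 (by simp) ?_
    intro X hX1 hX2
    have hX : X = pvCF s.2 := by simpa using hX2
    subst hX
    rw [hrest'] at hX1
    obtain ⟨c, hc, hcf⟩ := List.mem_map.mp hX1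
    have hcc : c ∈ comps := List.mem_of_mem_filter hc
    have hpX : p ∈ pvCF s.2 := by
      rw [hmergedF]
      exact mem_pvClass_self (Finset.mem_insert_self _ _)
    rw [← hcf] at hpX
    exact hp (hsubT c hcc p (List.mem_toFinset.mp hpX))
  · intro X
    rw [haddp, List.map_append, List.mem_append]
    constructor
    · rintro (hX | hX)
      · rw [hrest'] at hX
        obtain ⟨c, hcf, rfl⟩ := List.mem_map.mp hX
        have hcc : c ∈ comps := List.mem_of_mem_filter hcf
        have hdis : PySem.Set.inter c (pvNbrs p) = [] := by
          have := List.of_mem_filter hcf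
          simpa using this
        obtain ⟨q, hq, hcfq⟩ := hrep c hcc
        rw [hcfq, ← huntouched c hcc hdis q hq hcfq]
        exact Finset.mem_image.mpr ⟨q, Finset.mem_insert_of_mem hq, rfl⟩
      · have hX : X = pvCF s.2 := by simpa using hX
        subst hX
        rw [hmergedF]
        exact Finset.mem_image.mpr ⟨p, Finset.mem_insert_self _ _, rfl⟩
    · intro hX
      obtain ⟨q, hq, rfl⟩ := Finset.mem_image.mp hX
      rcases Finset.mem_insert.mp hq with rfl | hqT
      · exact Or.inr (by simp [hmergedF])
      · by_cases hqp : pvReach (insert p T) q p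
        · have : pvClass (insert p T) q = pvClass (insert p T) p :=
            pvClass_eq_of_reach hqp
          exact Or.inr (by simp [this, hmergedF])
        · obtain ⟨c, hc, hcf⟩ := hclassmem q hqT
          have hdis : PySem.Set.inter c (pvNbrs p) = [] := by
            by_contra hne
            obtain ⟨n, hnc, hnn⟩ := (pvInter_ne_iff c (pvNbrs p)).mp hne
            have hrn : pvReach T q n :=
              (mem_pvClass.mp (hcf ▸ List.mem_toFinset.mpr hnc)).2
            exact hqp ((pvReach_mono hrn).tail
              ⟨Finset.mem_insert_of_mem (hsubT c hc n hnc),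
               Finset.mem_insert_self _ _, pvAdj_symm hnn⟩)
          refine Or.inl ?_
          rw [huntouched c hc hdis q hqT hcf, ← hcf, hrest']
          exact List.mem_map_of_mem (List.mem_filter_of_mem hc (by simp [hdis]))

theorem pvB_fold :
    ∀ (M L : List (Int × Int)), (L ++ M).Nodup →
    ∀ (comps : List (PySem.Set (Int × Int))),
    (comps.map pvCF).Nodup →
    (∀ X, X ∈ comps.map pvCF ↔ X ∈ L.toFinset.image (pvClass L.toFinset)) →
    ((M.foldl pvAddPoint comps).map pvCF).Nodup ∧
    (∀ X, X ∈ (M.foldl pvAddPoint comps).map pvCF ↔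
       X ∈ (L ++ M).toFinset.image (pvClass (L ++ M).toFinset)) := by
  intro M
  induction M with
  | nil =>
    intro L _ comps hnd hmem
    simp only [List.foldl_nil, List.append_nil]
    exact ⟨hnd, hmem⟩
  | cons p M ih =>
    intro L hLM comps hnd hmem
    have hpL : p ∉ L.toFinset := by
      rw [List.mem_toFinset]
      intro hmem'
      have := List.disjoint_of_nodup_append hLM
      exact this hmem' List.mem_cons_self
    have hins : (L ++ [p]).toFinset = insert p L.toFinset := by
      ext a; simp [List.mem_toFinset]
    obtain ⟨hnd', hmem'⟩ := pvAddPoint_inv L.toFinset comps p hpL hnd hmem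
    have hLM' : ((L ++ [p]) ++ M).Nodup := by
      simpa [List.append_assoc] using hLM
    have := ih (L ++ [p]) hLM' (pvAddPoint comps p) hnd'
      (by intro X; rw [hmem' X, hins])
    simp only [List.foldl_cons]
    constructor
    · exact this.1
    · intro X
      rw [(this.2 X)]
      simp [List.append_assoc]

theorem pvB_val (perims : List (Int × Int)) :
    walkPerimiter_alt perims =
      ((perims.toFinset.image (pvClass perims.toFinset)).card : Int) := by
  unfold walkPerimiter_alt
  obtain ⟨hnd, hmem⟩ := pvB_fold (PySem.List.dedup perims) [] (by simp)
    [] (by simp) (by simp)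
  have hTF : (PySem.List.dedup perims).toFinset = perims.toFinset := by
    ext a
    simp only [List.mem_toFinset, PySem.List.dedup_eq_ofList, PySem.Set.mem_ofList]
  set r := (PySem.List.dedup perims).foldl pvAddPoint []
  have hsets : (r.map pvCF).toFinset = perims.toFinset.image (pvClass perims.toFinset) := by
    apply Finset.ext
    intro X
    rw [List.mem_toFinset, hmem X, List.nil_append, hTF]
  have hlen : r.length = (perims.toFinset.image (pvClass perims.toFinset)).card := by
    rw [← hsets, List.toFinset_card_of_nodup hnd, List.length_map]
  rw [hlen]

-- ---- counting: split the classes into non-isolated ones and isolated singletons ----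

theorem pvNcomp_split (S : Finset (Int × Int)) :
    (S.image (pvClass S)).card =
      ((@Finset.filter _ (fun p => pvHasNbr S p) (Classical.decPred _) S).image (pvClass S)).card +
        (@Finset.filter _ (fun p => ¬ pvHasNbr S p) (Classical.decPred _) S).card := by
  set H := @Finset.filter _ (fun p => pvHasNbr S p) (Classical.decPred _) S with hH
  set I := @Finset.filter _ (fun p => ¬ pvHasNbr S p) (Classical.decPred _) S with hI
  have hmemH : ∀ a, a ∈ H ↔ a ∈ S ∧ pvHasNbr S a := by
    intro a; rw [hH]; exact @Finset.mem_filter _ _ (Classical.decPred _) _ _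
  have hmemI : ∀ a, a ∈ I ↔ a ∈ S ∧ ¬ pvHasNbr S a := by
    intro a; rw [hI]; exact @Finset.mem_filter _ _ (Classical.decPred _) _ _
  have hreach_nbr : ∀ {q1 q2 : Int × Int}, pvReach S q1 q2 → pvHasNbr S q1 → pvHasNbr S q2 := by
    intro q1 q2 hr hnb
    by_cases he : q2 = q1
    · exact he ▸ hnb
    · exact pvReach_hasNbr_right hr he
  have himg : S.image (pvClass S) = H.image (pvClass S) ∪ I.image (pvClass S) := by
    apply Finset.ext
    intro X
    rw [Finset.mem_union, Finset.mem_image, Finset.mem_image, Finset.mem_image]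
    constructor
    · rintro ⟨q, hq, rfl⟩
      by_cases hnb : pvHasNbr S q
      · exact Or.inl ⟨q, (hmemH q).mpr ⟨hq, hnb⟩, rfl⟩
      · exact Or.inr ⟨q, (hmemI q).mpr ⟨hq, hnb⟩, rfl⟩
    · rintro (⟨q, hq, rfl⟩ | ⟨q, hq, rfl⟩)
      · exact ⟨q, ((hmemH q).mp hq).1, rfl⟩
      · exact ⟨q, ((hmemI q).mp hq).1, rfl⟩
  have hdisj : Disjoint (H.image (pvClass S)) (I.image (pvClass S)) := by
    rw [Finset.disjoint_left]
    intro X hX1 hX2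
    obtain ⟨q1, hq1, rfl⟩ := Finset.mem_image.mp hX1
    obtain ⟨q2, hq2, heq⟩ := Finset.mem_image.mp hX2
    have hq2c : q2 ∈ pvClass S q1 := heq ▸ mem_pvClass_self ((hmemI q2).mp hq2).1
    have hr : pvReach S q1 q2 := (mem_pvClass.mp hq2c).2
    exact ((hmemI q2).mp hq2).2 (hreach_nbr hr ((hmemH q1).mp hq1).2)
  have hcardI : (I.image (pvClass S)).card = I.card := by
    apply Finset.card_image_of_injOn
    intro q1 hq1 q2 hq2 heq
    have hq2c : q2 ∈ pvClass S q1 := heq ▸ mem_pvClass_self ((hmemI q2).mp hq2).1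
    have hr : pvReach S q1 q2 := (mem_pvClass.mp hq2c).2
    by_contra hne
    exact ((hmemI q2).mp hq2).2 (pvReach_hasNbr_right hr (fun e => hne e.symm))
  rw [himg, Finset.card_union_of_disjoint hdisj, hcardI]

theorem pvCount_filter (l : List (Int × Int)) (q : (Int × Int) → Bool) (a : Int × Int)
    (h : q a = true) : (l.filter q).count a = l.count a := by
  induction l with
  | nil => rfl
  | cons x xs ih =>
    by_cases hqx : q x = true
    · rw [List.filter_cons_of_pos hqx]
      simp [List.count_cons, ih]
    · rw [List.filter_cons_of_neg (by simpa using hqx)]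
      have hxa : ¬ x = a := fun e => hqx (by rw [e]; exact h)
      simp [ih, hxa]

theorem pvCount_inst (l : List (Int × Int)) (a : Int × Int) :
    @List.count (Int × Int) instBEqOfDecidableEq a l = List.count a l := by
  induction l with
  | nil => rfl
  | cons x xs ih =>
    by_cases hax : a = x
    · subst hax; simp [ih]
    · simp [List.count_cons, ih, beq_iff_eq]

theorem pvCountP_iso (perims : List (Int × Int)) (hnd : perims.Nodup) :
    perims.countP (pvIsoB perims) =
      (@Finset.filter _ (fun p => ¬ pvHasNbr perims.toFinset p) (Classical.decPred _)
        perims.toFinset).card := by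
  set I := @Finset.filter _ (fun p => ¬ pvHasNbr perims.toFinset p) (Classical.decPred _)
    perims.toFinset with hI
  have hmemI : ∀ a, a ∈ I ↔ a ∈ perims.toFinset ∧ ¬ pvHasNbr perims.toFinset a := by
    intro a; rw [hI]; exact @Finset.mem_filter _ _ (Classical.decPred _) _ _
  have hfin : (perims.filter (pvIsoB perims)).toFinset = I := by
    apply Finset.ext
    intro a
    rw [List.mem_toFinset, List.mem_filter, hmemI a, List.mem_toFinset]
    constructor
    · rintro ⟨h1, h2⟩; exact ⟨h1, (pvIsoB_iff perims a).mp h2⟩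
    · rintro ⟨h1, h2⟩; exact ⟨h1, (pvIsoB_iff perims a).mpr h2⟩
  have hcount : perims.countP (pvIsoB perims) = ∑ a ∈ I, perims.count a := by
    rw [List.countP_eq_length_filter,
      ← List.sum_toFinset_count_eq_length (perims.filter (pvIsoB perims)), hfin]
    apply Finset.sum_congr rfl
    intro a ha
    have hiso : pvIsoB perims a = true := (pvIsoB_iff perims a).mpr ((hmemI a).mp ha).2
    rw [pvCount_inst]
    exact pvCount_filter perims (pvIsoB perims) a hiso
  rw [hcount]
  have hone : ∀ a ∈ I, perims.count a = 1 := by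
    intro a ha
    have hle := List.nodup_iff_count_le_one.mp hnd a
    have hpos : 0 < perims.count a :=
      List.count_pos_iff.mpr (List.mem_toFinset.mp ((hmemI a).mp ha).1)
    omega
  rw [Finset.sum_congr rfl hone]
  simp

theorem pvNI_perims (perims : List (Int × Int)) :
    pvNI perims perims =
      @Finset.filter _ (fun p => pvHasNbr perims.toFinset p) (Classical.decPred _)
        perims.toFinset := rfl

-- ===== VERDICT (by name: the statement is the Claim_ definition above) =====
theorem walkPerimiter_spec : Claim_equal_walkPerimiter := by
  intro perims _ hpre
  unfold Spec_walkPerimiter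
  rw [pvA_val, pvB_val, pvNcomp_split, pvNI_perims, pvCountP_iso perims hpre]
  push_cast
  ring
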